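-- pv_equiv track=rewrite | github.com/paulwxq/VANNA-CHAINLIT-CHROMADB | schema_tools/utils/table_parser.py | _validate_table_name
-- ===== SOURCE A (Python) =====
-- def _validate_table_name(table_name: str) -> bool:
--     """
--     验证表名格式
--
--     Args:
--         table_name: 表名
--
--     Returns:
--         是否合法
--     """
--     # 基本验证：不能为空，不能包含特殊字符
--     if not table_name:
--         return False
--
--     # 禁止的字符
--     forbidden_chars = [';', '(', ')', '[', ']', '{', '}', '*', '?', '!', '@', '#', '$', '%', '^', '&']
--     for char in forbidden_chars:
--         if char in table_name:
--             return False
--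
--     # 表名格式：schema.table 或 table
--     parts = table_name.split('.')
--     if len(parts) > 2:
--         return False
--
--     # 每部分都不能为空
--     for part in parts:
--         if not part:
--             return False
--
--     return True
-- ===== SOURCE B (Python) =====
-- def _validate_table_name(table_name: str) -> bool:
--     """One left-to-right pass: reject on any forbidden character, count dots,
--     then check shape (non-empty, at most one dot, no leading/trailing dot)."""
--     forbidden = set(';()[]{}*?!@#$%^&')
--     dots = 0
--     for ch in table_name:
--         if ch in forbidden:
--             return False
--         if ch == '.':
--             dots += 1
--     return bool(table_name) and dots <= 1 and table_name[0] != '.' and table_name[-1] != '.'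
-- ===== Notes on version B (the rewrite author's own statement) =====
-- stated objective: alternative
-- what changed: Replaces the 16 whole-string substring scans plus a split-on-dot pass with re-checks by a single character pass that rejects forbidden characters and counts dots, then validates the shape from the dot count and the first/last character.
import Mathlib
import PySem

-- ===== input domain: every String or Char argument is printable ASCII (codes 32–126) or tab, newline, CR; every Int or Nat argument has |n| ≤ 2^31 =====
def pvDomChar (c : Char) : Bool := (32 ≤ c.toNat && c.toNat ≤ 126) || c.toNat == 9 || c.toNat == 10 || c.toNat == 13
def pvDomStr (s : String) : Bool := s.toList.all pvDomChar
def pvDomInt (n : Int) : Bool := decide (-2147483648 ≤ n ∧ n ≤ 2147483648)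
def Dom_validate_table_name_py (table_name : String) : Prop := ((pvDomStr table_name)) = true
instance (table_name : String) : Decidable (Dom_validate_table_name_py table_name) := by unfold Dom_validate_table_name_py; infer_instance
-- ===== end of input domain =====

-- B replaces A's 16 substring scans + split('.') re-check with one character pass
-- (reject forbidden chars, count dots) plus a shape check on the first/last character.


-- ===== PORT A =====
def pvForbiddenStrs : List String :=
  [";", "(", ")", "[", "]", "{", "}", "*", "?", "!", "@", "#", "$", "%", "^", "&"]

def validate_table_name_py (table_name : String) : Bool :=
  -- if not table_name: return False
  if table_name == "" then false
  -- for char in forbidden_chars: if char in table_name: return False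
  else if pvForbiddenStrs.any (fun ch => PySem.Str.isIn ch table_name) then false
  else
    -- parts = table_name.split('.')
    match PySem.Str.split? table_name "." with
    | none => false   -- unreachable: the separator "." is non-empty
    | some parts =>
      if parts.length > 2 then false
      -- for part in parts: if not part: return False
      else if parts.any (fun part => part == "") then false
      else true

-- ===== PORT B =====
def pvForbiddenSet : PySem.Set Char :=
  PySem.Set.ofList [';', '(', ')', '[', ']', '{', '}', '*', '?', '!', '@', '#', '$', '%', '^', '&']

-- the for-loop of B: early-return none on a forbidden char, else count dots
def pvScanB : List Char → Nat → Option Nat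
  | [], dots => some dots
  | c :: rest, dots =>
    if PySem.Set.contains pvForbiddenSet c then none
    else pvScanB rest (if c == '.' then dots + 1 else dots)

def validate_table_name_py_alt (table_name : String) : Bool :=
  match pvScanB table_name.toList 0 with
  | none => false
  | some dots =>
    match table_name.toList with
    | [] => false     -- bool(table_name) is False
    | c :: rest =>
      decide (dots ≤ 1) && (c != '.') && (List.getLast (c :: rest) (by simp) != '.')

-- ===== PRECONDITION & SPEC =====
def Spec_validate_table_name_py (table_name : String) (out : Bool) : Prop := out = validate_table_name_py_alt table_name
instance (table_name : String) (out : Bool) : Decidable (Spec_validate_table_name_py table_name out) := by unfold Spec_validate_table_name_py; infer_instance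

-- ===== CLAIM (what is proved, stated in full; the proofs are below) =====
def Claim_equal_validate_table_name_py : Prop := ∀ (table_name : String), Dom_validate_table_name_py table_name → Spec_validate_table_name_py table_name (validate_table_name_py table_name)

-- ===== LEMMAS AND PROOFS =====

-- simple reference splitter: what Chars.splitOn computes for the one-char separator '.'
def pvSp : List Char → List Char → List (List Char)
  | [], cur => [cur.reverse]
  | c :: rest, cur => if c = '.' then cur.reverse :: pvSp rest [] else pvSp rest (c :: cur)

theorem pvGo_dot (cs : List Char) : ∀ (fuel : Nat) (cur : List Char) (acc : List (List Char)),
    cs.length ≤ fuel →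
    PySem.Chars.splitOn.go ['.'] fuel cs cur acc = acc.reverse ++ pvSp cs cur := by
  induction cs with
  | nil =>
    intro fuel cur acc _
    cases fuel <;> simp [PySem.Chars.splitOn.go, pvSp]
  | cons c rest ih =>
    intro fuel cur acc hle
    cases fuel with
    | zero => simp at hle
    | succ f =>
      rw [PySem.Chars.splitOn.go.eq_def]
      simp only [List.isPrefixOf, List.length_cons] at *
      by_cases hc : c = '.'
      · subst hc
        simp [pvSp, ih f [] (cur.reverse :: acc) (by omega)]
      · have : ('.' == c) = false := by simp; exact fun h => hc h.symm
        simp [hc, pvSp, this, ih f (c :: cur) acc (by omega)]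

theorem pvSplitOn_dot (cs : List Char) : PySem.Chars.splitOn cs ['.'] = pvSp cs [] := by
  unfold PySem.Chars.splitOn
  simpa using pvGo_dot cs (cs.length + 1) [] [] (by omega)

theorem pvSp_length (cs : List Char) : ∀ cur, (pvSp cs cur).length = cs.count '.' + 1 := by
  induction cs with
  | nil => intro cur; simp [pvSp]
  | cons c rest ih =>
    intro cur
    by_cases hc : c = '.' <;> simp [pvSp, hc, ih]

theorem pvSp_no_dot (cs : List Char) (h : '.' ∉ cs) : ∀ cur, pvSp cs cur = [cur.reverse ++ cs] := by
  induction cs with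
  | nil => intro cur; simp [pvSp]
  | cons c rest ih =>
    intro cur
    simp only [List.mem_cons, not_or] at h
    have hc : ¬ c = '.' := fun hh => h.1 hh.symm
    simp [pvSp, hc, ih h.2]

theorem pvSp_one_dot (u : List Char) (h : '.' ∉ u) (v : List Char) :
    ∀ cur, pvSp (u ++ '.' :: v) cur = (cur.reverse ++ u) :: pvSp v [] := by
  induction u with
  | nil => intro cur; simp [pvSp]
  | cons c rest ih =>
    intro cur
    simp only [List.mem_cons, not_or] at h
    have hc : ¬ c = '.' := fun hh => h.1 hh.symm
    simp [pvSp, hc, ih h.2]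

theorem pvScanB_eq (cs : List Char) : ∀ d, pvScanB cs d =
    if cs.any (fun c => PySem.Set.contains pvForbiddenSet c) then none
    else some (d + cs.count '.') := by
  induction cs with
  | nil => intro d; simp [pvScanB]
  | cons c rest ih =>
    intro d
    by_cases hf : c ∈ pvForbiddenSet
    · simp [pvScanB, hf]
    · by_cases hc : c = '.' <;>
        simp [pvScanB, hf, hc, ih] <;> split <;> simp_all <;> ring_nf

theorem pvForbidden_agree (s : String) :
    pvForbiddenStrs.any (fun ch => PySem.Str.isIn ch s)
      = s.toList.any (fun c => PySem.Set.contains pvForbiddenSet c) := by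
  have hset : pvForbiddenSet = [';', '(', ')', '[', ']', '{', '}', '*', '?', '!', '@', '#', '$', '%', '^', '&'] := by decide
  rw [Bool.eq_iff_iff]
  simp [pvForbiddenStrs, hset, PySem.Chars.isIn_iff_infix, List.singleton_infix_iff]
  constructor
  · rintro (h|h|h|h|h|h|h|h|h|h|h|h|h|h|h|h) <;> exact ⟨_, h, by simp⟩
  · rintro ⟨c, hc, hmem⟩
    rcases hmem with h|h|h|h|h|h|h|h|h|h|h|h|h|h|h|h <;> subst h <;> tauto

theorem pvCount_one_decomp (cs : List Char) (h : cs.count '.' = 1) :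
    ∃ u v, cs = u ++ '.' :: v ∧ '.' ∉ u ∧ '.' ∉ v := by
  induction cs with
  | nil => simp at h
  | cons c rest ih =>
    by_cases hc : c = '.'
    · subst hc
      have h0 : rest.count '.' = 0 := by simpa [List.count_cons] using h
      exact ⟨[], rest, rfl, by simp, List.count_eq_zero.mp h0⟩
    · have h1 : rest.count '.' = 1 := by
        rw [List.count_cons] at h
        simp only [beq_iff_eq, hc, if_false] at h
        exact h
      obtain ⟨u, v, h1, h2, h3⟩ := ih h1
      exact ⟨c :: u, v, by simp [h1], by
        simp only [List.mem_cons, not_or]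
        exact ⟨fun hh => hc hh.symm, h2⟩, h3⟩

theorem validate_table_name_py_spec : Claim_equal_validate_table_name_py := by
  intro s _
  unfold Spec_validate_table_name_py validate_table_name_py validate_table_name_py_alt
  rw [pvScanB_eq, pvForbidden_agree]
  by_cases hF : (s.toList.any fun c => PySem.Set.contains pvForbiddenSet c) = true
  · have hF' : ∃ x ∈ s.toList, x ∈ pvForbiddenSet := by simpa using hF
    simp [hF']
  · rw [Bool.not_eq_true] at hF
    by_cases hs : s = ""
    · subst hs; simp
    · have hne : s.toList ≠ [] := by simpa [String.toList_eq_nil_iff] using hs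
      obtain ⟨c, rest, hcs⟩ := List.exists_cons_of_ne_nil hne
      have hsplit : PySem.Str.split? s "." = some ((pvSp s.toList []).map String.ofList) := by
        simp [PySem.Str.split?, PySem.Chars.split?, pvSplitOn_dot]
      simp only [hsplit, hF, Bool.false_eq_true, if_false, beq_iff_eq, hs]
      rcases hn2 : s.toList.count '.' with _ | n
      · -- no dot
        have hnot : '.' ∉ s.toList := List.count_eq_zero.mp hn2
        have hsp : pvSp s.toList [] = [s.toList] := by simpa using pvSp_no_dot s.toList hnot []
        rw [hcs] at hsp ⊢
        have hc0 : c ≠ '.' := fun h => hnot (by rw [hcs, h]; simp)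
        have hlast : List.getLast (c :: rest) (by simp) ≠ '.' := fun h => by
          have := List.getLast_mem (l := c :: rest) (by simp)
          rw [h, ← hcs] at this; exact hnot this
        simp [hsp, hc0, hlast, String.ofList_eq_empty_iff]
      · -- at least one dot
        rcases n with _ | m
        · -- exactly one dot: s = u ++ '.' :: v with u, v dot-free
          obtain ⟨u, v, huv, hu, hv⟩ := pvCount_one_decomp _ hn2
          have hsp : pvSp s.toList [] = [u, v] := by
            rw [huv, pvSp_one_dot u hu v []]
            have hv0 : pvSp v [] = [v] := by simpa using pvSp_no_dot v hv []
            simp [hv0]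
          rw [hcs] at huv hsp
          rw [hcs]
          have hgl := List.getLast?_eq_some_getLast (l := c :: rest) (by simp)
          have hq : (c :: rest).getLast? = ('.' :: v).getLast? := by
            rw [huv]; exact List.getLast?_append_of_ne_nil u (by simp)
          rcases u with _ | ⟨a, u'⟩
          · -- empty schema part: leading dot, both sides reject
            obtain ⟨hc1, -⟩ := List.cons.inj (by simpa using huv)
            subst hc1
            simp [hsp]
          · -- non-empty schema part: head is a non-dot character
            obtain ⟨hc1, -⟩ := List.cons.inj huv
            have hcne : c ≠ '.' := fun h => hu (by rw [← hc1, ← h]; simp)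
            rcases hveq : v with _ | ⟨b, v'⟩
            · -- empty table part: trailing dot, both sides reject
              subst hveq
              have hlast : List.getLast (c :: rest) (by simp) = '.' := by
                rw [hq] at hgl
                simpa using hgl.symm
              simp [hsp, hlast]
            · -- both parts non-empty: both sides accept
              subst hveq
              have hlast : List.getLast (c :: rest) (by simp) ≠ '.' := by
                intro hcontra
                rw [hq, List.getLast?_cons_cons,
                    List.getLast?_eq_some_getLast (l := b :: v') (by simp)] at hgl
                have hmem : List.getLast (b :: v') (by simp) ∈ b :: v' :=
                  List.getLast_mem (by simp)
                have : ('.' : Char) ∈ b :: v' := by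
                  rw [← hcontra]
                  exact (Option.some.inj hgl) ▸ hmem
                exact hv this
              simp [hsp, hlast, hcne]
        · -- two or more dots: both sides reject
          have hlen : (pvSp s.toList []).length = m + 3 := by
            rw [pvSp_length s.toList [], hn2]
          rw [hcs] at hlen
          rw [hcs]
          simp [hlen]
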